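-- pv_equiv track=rewrite | github.com/lychanl/acer-release | tools/visualise.py | make_order
-- ===== SOURCE A (Python) =====
-- def make_order(values, first_algo):
--     s = list(sorted(values.items()))
--     first = []
--     other = []
--
--     for v in s:
--         if first_algo and v[0].upper() == first_algo.upper():
--             first.append(v)
--         else:
--             other.append(v)
--
--     return first + other
-- ===== SOURCE B (Python) =====
-- def make_order(values, first_algo):
--     return sorted(
--         values.items(),
--         key=lambda kv: (not (first_algo and kv[0].upper() == first_algo.upper()), kv[0]),
--     )
-- ===== Notes on version B (the rewrite author's own statement) =====
-- stated objective: simpler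
-- what changed: Replaced sort-then-partition (explicit loop appending to two auxiliary lists, then concatenation) by a single sorted() call with a composite (match-priority, key) sort key, returning the sorted list directly.
import Mathlib
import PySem

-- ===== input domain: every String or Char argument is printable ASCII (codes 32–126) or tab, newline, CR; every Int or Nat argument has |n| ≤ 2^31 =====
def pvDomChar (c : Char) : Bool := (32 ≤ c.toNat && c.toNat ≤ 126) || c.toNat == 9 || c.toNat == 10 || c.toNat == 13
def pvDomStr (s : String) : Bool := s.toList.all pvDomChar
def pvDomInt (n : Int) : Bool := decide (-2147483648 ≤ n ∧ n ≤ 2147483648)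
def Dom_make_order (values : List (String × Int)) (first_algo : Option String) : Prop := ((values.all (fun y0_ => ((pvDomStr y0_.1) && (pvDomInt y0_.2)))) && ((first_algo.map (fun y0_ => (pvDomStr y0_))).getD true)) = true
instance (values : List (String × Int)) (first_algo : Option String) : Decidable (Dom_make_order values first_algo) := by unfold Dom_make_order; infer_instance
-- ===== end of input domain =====

-- B replaces A's sort-then-partition loop with one sorted() call on a composite
-- (match-priority, key) key; objective: simpler (no speed claim).

-- shared helper: Python's 'first_algo and v[0].upper() == first_algo.upper()'
-- (first_algo is truthy iff it is a non-empty string)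
def pvMatch (first_algo : Option String) (p : String × Int) : Bool :=
  match first_algo with
  | none => false
  | some fa => decide (fa ≠ "") && (PySem.Str.upper p.1 == PySem.Str.upper fa)

-- ===== PORT A =====
-- s = list(sorted(values.items())); dict keys are distinct, so Python's tuple
-- comparison never reaches the Int component: sorting by the key alone is exact here.
def make_order (values : List (String × Int)) (first_algo : Option String) : List (String × Int) :=
  let s := PySem.List.sorted ((PySem.Dict.ofList values).items) (fun v => v.1) false
  let fo := s.foldl
    (fun (acc : List (String × Int) × List (String × Int)) v =>
      if pvMatch first_algo v then (acc.1 ++ [v], acc.2) else (acc.1, acc.2 ++ [v]))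
    ([], [])
  fo.1 ++ fo.2

-- ===== PORT B =====
-- sorted(values.items(), key=lambda kv: (not match(kv), kv[0])): the boolean
-- first component is encoded as Nat 0 (False, i.e. a match) / 1 (True).
def make_order_alt (values : List (String × Int)) (first_algo : Option String) : List (String × Int) :=
  PySem.List.sorted2 ((PySem.Dict.ofList values).items)
    (fun kv => if pvMatch first_algo kv then (0 : Nat) else 1) (fun kv => kv.1) false

-- ===== PRECONDITION & SPEC =====
def Spec_make_order (values : List (String × Int)) (first_algo : Option String) (out : List (String × Int)) : Prop := out = make_order_alt values first_algo
instance (values : List (String × Int)) (first_algo : Option String) (out : List (String × Int)) : Decidable (Spec_make_order values first_algo out) := by unfold Spec_make_order; infer_instance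

-- ===== CLAIM (what is proved, stated in full; the proofs are below) =====
def Claim_equal_make_order : Prop := ∀ (values : List (String × Int)) (first_algo : Option String), Dom_make_order values first_algo → Spec_make_order values first_algo (make_order values first_algo)

-- ===== LEMMAS AND PROOFS =====

-- A's loop is the two-filter partition
theorem pv_foldl_partition {α : Type} (p : α → Bool) (l : List α) (a1 a2 : List α) :
    l.foldl (fun (acc : List α × List α) v =>
      if p v then (acc.1 ++ [v], acc.2) else (acc.1, acc.2 ++ [v])) (a1, a2)
    = (a1 ++ l.filter p, a2 ++ l.filter (fun v => !p v)) := by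
  induction l generalizing a1 a2 with
  | nil => simp
  | cons x xs ih =>
    by_cases h : p x = true <;> simp [h, ih]

-- sorted2 with a (Nat, String) key is sorted with the lexicographic key
theorem pv_sorted2_eq_sorted_lex {α : Type} (xs : List α) (k1 : α → Nat) (k2 : α → String) :
    PySem.List.sorted2 xs k1 k2 false
      = PySem.List.sorted xs (fun x => toLex (k1 x, k2 x)) false := by
  show List.foldl _ [] xs = List.foldl _ [] xs
  have hb : (fun a b => decide (k1 a < k1 b) || (!decide (k1 b < k1 a) && decide (k2 a < k2 b)))
      = (fun a b => decide (toLex (k1 a, k2 a) < toLex (k1 b, k2 b))) := by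
    funext a b
    rcases Nat.lt_trichotomy (k1 a) (k1 b) with h | h | h
    · simp [Prod.Lex.toLex_lt_toLex, h]
    · simp [Prod.Lex.toLex_lt_toLex, h]
    · have h1 : ¬ k1 a < k1 b := Nat.lt_asymm h
      have h2 : k1 a ≠ k1 b := by omega
      simp [Prod.Lex.toLex_lt_toLex, h1, h2, h]
  simp only [Bool.false_eq_true, if_false]
  rw [hb]

theorem make_order_spec_aux (values : List (String × Int)) (first_algo : Option String) :
    make_order values first_algo = make_order_alt values first_algo := by
  obtain ⟨s, hs⟩ : ∃ s, PySem.List.sorted ((PySem.Dict.ofList values).items)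
      (fun v : String × Int => v.1) false = s := ⟨_, rfl⟩
  have hA : make_order values first_algo
      = s.filter (pvMatch first_algo) ++ s.filter (fun v => !pvMatch first_algo v) := by
    simp only [make_order, hs, pv_foldl_partition]
    simp
  -- s is strictly increasing on keys
  have hnd : (s.map (fun v : String × Int => v.1)).Nodup := by
    have h2 : (PySem.Dict.ofList values).keys.Nodup := PySem.Dict.nodup_keys_ofList values
    have hperm : s.Perm (PySem.Dict.ofList values).items := by
      rw [← hs]; exact PySem.List.sorted_perm _ _ _
    exact ((hperm.map _).nodup_iff).mpr h2
  have hlt : s.Pairwise (fun a b : String × Int => a.1 < b.1) := by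
    have hle : s.Pairwise (fun a b : String × Int => a.1 ≤ b.1) := by
      rw [← hs]; exact PySem.List.sorted_pairwise _ _
    have hne : s.Pairwise (fun a b : String × Int => a.1 ≠ b.1) :=
      (List.pairwise_map).mp hnd
    exact (hle.and hne).imp (fun h => lt_of_le_of_ne h.1 h.2)
  -- B's value: the unique strictly (priority, key)-increasing rearrangement
  have hB : make_order_alt values first_algo
      = s.filter (pvMatch first_algo) ++ s.filter (fun v => !pvMatch first_algo v) := by
    rw [make_order_alt, pv_sorted2_eq_sorted_lex]
    apply PySem.List.sorted_eq_of_perm_of_pairwise_lt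
    · refine (List.filter_append_perm _ s).trans ?_
      rw [← hs]; exact PySem.List.sorted_perm _ _ _
    · rw [List.pairwise_append]
      refine ⟨?_, ?_, ?_⟩
      · refine (List.pairwise_filter.mpr (hlt.imp ?_))
        intro a b h ha hb
        simp [Prod.Lex.toLex_lt_toLex, ha, hb, h]
      · refine (List.pairwise_filter.mpr (hlt.imp ?_))
        intro a b h ha hb
        simp only [Bool.not_eq_eq_eq_not, Bool.not_true] at ha hb
        simp [Prod.Lex.toLex_lt_toLex, ha, hb, h]
      · intro a ha b hb
        have ha' : pvMatch first_algo a = true := (List.mem_filter.mp ha).2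
        have hb' : pvMatch first_algo b = false := by
          have := (List.mem_filter.mp hb).2
          simpa using this
        simp [Prod.Lex.toLex_lt_toLex, ha', hb']
  rw [hA, hB]

-- ===== VERDICT (by name: the statement is the Claim_ definition above) =====
theorem make_order_spec : Claim_equal_make_order := by
  intro values first_algo _
  show make_order values first_algo = make_order_alt values first_algo
  exact make_order_spec_aux values first_algo
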